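-- pv_equiv track=rewrite | github.com/thob97/uni_fu_alp2 | u4/U4.py | genSolution
-- ===== SOURCE A (Python) =====
-- def genSolution(xs):
--     length = len(xs)
--     length2 = len(xs[0])
--     for rh in range (0, length):
--         for sp in range (0, length2 ):
--             if (xs[rh][sp] == ' . '):
--                 temp=0
--                 for i in (-1,1,0):
--                     for ii in (-1,1,0):
--                         if (rh+i >=0 and rh+i<length and sp+ii>=0 and sp+ii<length2):
--                             if(xs[rh+i][sp+ii] ==' o '):
--                                 temp +=1
--             if(xs[rh][sp] == ' . ' and temp !=0):
--                 xs[rh][sp] = " " + str(temp) + " "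
--
--     return xs
-- ===== SOURCE B (Python) =====
-- def genSolution(xs):
--     n = len(xs)
--     m = len(xs[0])
--     counts = {}
--     for r in range(0, n):
--         for c in range(0, m):
--             if xs[r][c] == ' o ':
--                 for i in (-1, 0, 1):
--                     for ii in (-1, 0, 1):
--                         if 0 <= r + i < n and 0 <= c + ii < m and xs[r + i][c + ii] == ' . ':
--                             key = (r + i, c + ii)
--                             counts[key] = counts.get(key, 0) + 1
--     return [[(' ' + str(counts[(r, c)]) + ' ') if (r, c) in counts else v
--              for c, v in enumerate(row)]
--             for r, row in enumerate(xs)]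
-- ===== Notes on version B (the rewrite author's own statement) =====
-- stated objective: alternative
-- what changed: A scans every '.' cell and gathers its 9 neighbour probes while mutating the grid in place; B makes one scatter pass over the 'o' cells accumulating a (row,col)-keyed counts dict and then builds a fresh output grid from that table (return-value equivalent; B does not mutate its argument).
import Mathlib
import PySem

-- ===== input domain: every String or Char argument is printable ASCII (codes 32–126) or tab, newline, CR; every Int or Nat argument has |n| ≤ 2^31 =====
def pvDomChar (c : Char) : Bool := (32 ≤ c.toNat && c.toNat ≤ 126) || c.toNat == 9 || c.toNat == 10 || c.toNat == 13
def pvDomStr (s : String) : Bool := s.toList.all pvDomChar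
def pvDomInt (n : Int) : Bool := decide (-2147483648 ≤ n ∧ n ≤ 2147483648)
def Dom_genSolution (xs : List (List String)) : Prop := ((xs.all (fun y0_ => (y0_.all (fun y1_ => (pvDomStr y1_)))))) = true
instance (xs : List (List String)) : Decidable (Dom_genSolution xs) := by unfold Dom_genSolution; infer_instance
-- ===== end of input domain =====

-- B replaces A's per-'.'-cell gather (9 neighbour probes for every '.' cell, writing into the
-- grid as it scans) by a scatter: one pass over the 'o' cells accumulates a counts dictionary
-- keyed by (row,col), then the output grid is assembled from that table (objective: alternative;
-- A mutates its argument in place, B builds a fresh grid — the equivalence is about the return value).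

-- ===== PORT A =====
-- xs[r][c] (indices here are always ≥ 0 and, inside Pre_, in range)
def pvGetCell (g : List (List String)) (r c : Nat) : String := (g.getD r []).getD c ""
-- xs[r][c] = v
def pvSetCell (g : List (List String)) (r c : Nat) (v : String) : List (List String) :=
  g.set r ((g.getD r []).set c v)
-- A's offset iteration order (-1, 1, 0)
def pvOffsA : List Int := [-1, 1, 0]

-- the two inner offset loops accumulating temp (started at 0 by 'temp=0')
def pvGatherA (g : List (List String)) (n m : Nat) (rh sp : Nat) : Int :=
  pvOffsA.foldl (fun t i => pvOffsA.foldl (fun t ii =>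
    if 0 ≤ (rh : Int) + i ∧ (rh : Int) + i < (n : Int) ∧ 0 ≤ (sp : Int) + ii ∧ (sp : Int) + ii < (m : Int) then
      if pvGetCell g ((rh : Int) + i).toNat ((sp : Int) + ii).toNat = " o " then t + 1 else t
    else t) t) 0

-- one iteration of A's inner 'sp' loop body; the state is (grid, temp): temp survives iterations
def pvStepA (n m : Nat) (st : List (List String) × Int) (rh sp : Nat) : List (List String) × Int :=
  let temp := if pvGetCell st.1 rh sp = " . " then pvGatherA st.1 n m rh sp else st.2
  let g := if pvGetCell st.1 rh sp = " . " ∧ temp ≠ 0 then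
      pvSetCell st.1 rh sp (" " ++ PySem.Int.toStr temp ++ " ")
    else st.1
  (g, temp)

def genSolution (xs : List (List String)) : List (List String) :=
  let n := xs.length
  let m := (xs.headD []).length
  ((List.range n).foldl (fun st rh => (List.range m).foldl (fun st sp => pvStepA n m st rh sp) st)
    (xs, 0)).1

-- ===== PORT B =====
-- B's offset iteration order (-1, 0, 1)
def pvOffsB : List Int := [-1, 0, 1]

-- first pass of B: scatter each ' o ' cell into a counts dict keyed by the (r,c) of its ' . ' neighbours
def pvScatter (xs : List (List String)) (n m : Nat) : PySem.Dict (Int × Int) Int :=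
  (List.range n).foldl (fun d r => (List.range m).foldl (fun d c =>
    if pvGetCell xs r c = " o " then
      pvOffsB.foldl (fun d i => pvOffsB.foldl (fun d ii =>
        if 0 ≤ (r : Int) + i ∧ (r : Int) + i < (n : Int) ∧ 0 ≤ (c : Int) + ii ∧ (c : Int) + ii < (m : Int) ∧
            pvGetCell xs ((r : Int) + i).toNat ((c : Int) + ii).toNat = " . " then
          PySem.Dict.modify d ((r : Int) + i, (c : Int) + ii) 0 (· + 1)
        else d) d) d
    else d) d) PySem.Dict.empty

def genSolution_alt (xs : List (List String)) : List (List String) :=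
  let n := xs.length
  let m := (xs.headD []).length
  let counts := pvScatter xs n m
  -- the comprehension: counts[(r,c)] under the 'in counts' guard is ported as getD (key present, exact)
  xs.mapIdx (fun r row => row.mapIdx (fun c v =>
    if counts.contains ((r : Int), (c : Int)) then
      " " ++ PySem.Int.toStr (counts.getD ((r : Int), (c : Int)) 0) ++ " "
    else v))

-- ===== PRECONDITION & SPEC =====
-- A raises IndexError iff xs is empty (xs[0]) or some row is shorter than row 0 (xs[rh][sp],
-- sp < len(xs[0])); Pre_ admits exactly the inputs on which A returns.
def Pre_genSolution (xs : List (List String)) : Prop :=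
  xs ≠ [] ∧ ∀ row ∈ xs, (xs.headD []).length ≤ row.length
instance (xs : List (List String)) : Decidable (Pre_genSolution xs) := by
  unfold Pre_genSolution; infer_instance
def pvWitness_genSolution : List (List String) := [[" . ", " o "], [" o ", "x"]]

def Spec_genSolution (xs : List (List String)) (out : List (List String)) : Prop := out = genSolution_alt xs
instance (xs : List (List String)) (out : List (List String)) : Decidable (Spec_genSolution xs out) := by unfold Spec_genSolution; infer_instance

-- ===== CLAIM (what is proved, stated in full; the proofs are below) =====
def Claim_equal_genSolution : Prop := ∀ (xs : List (List String)), Dom_genSolution xs → Pre_genSolution xs → Spec_genSolution xs (genSolution xs)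

-- ===== LEMMAS AND PROOFS =====

-- row-major list of all (r,c) cell coordinates
def pvCells (n m : Nat) : List (Nat × Nat) :=
  (List.range n).flatMap (fun r => (List.range m).map (fun c => (r, c)))

-- all 9 offsets, in A's order
def pvOffPairsA : List (Int × Int) := pvOffsA.flatMap (fun i => pvOffsA.map (fun ii => (i, ii)))
-- all 9 offsets, in B's order
def pvOffPairsB : List (Int × Int) := pvOffsB.flatMap (fun i => pvOffsB.map (fun ii => (i, ii)))

-- number of in-bounds ' o ' neighbours of (r,c) in grid g (the gather form)
def pvCnt (g : List (List String)) (n m : Nat) (r c : Nat) : Nat :=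
  pvOffPairsA.countP (fun q =>
    decide (0 ≤ (r : Int) + q.1 ∧ (r : Int) + q.1 < (n : Int) ∧ 0 ≤ (c : Int) + q.2 ∧ (c : Int) + q.2 < (m : Int) ∧
      pvGetCell g ((r : Int) + q.1).toNat ((c : Int) + q.2).toNat = " o "))

def pvMark (k : Int) : String := " " ++ PySem.Int.toStr k ++ " "

-- the common closed form of both programs' results
def pvSpec (xs : List (List String)) : List (List String) :=
  let n := xs.length
  let m := (xs.headD []).length
  xs.mapIdx (fun r row => row.mapIdx (fun c v =>
    if c < m ∧ v = " . " ∧ pvCnt xs n m r c ≠ 0 then pvMark ((pvCnt xs n m r c : Int)) else v))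

-- grid xs with exactly the cells in D finished
def pvApply (xs : List (List String)) (n m : Nat) (D : List (Nat × Nat)) : List (List String) :=
  xs.mapIdx (fun r row => row.mapIdx (fun c v =>
    if (r, c) ∈ D ∧ v = " . " ∧ pvCnt xs n m r c ≠ 0 then pvMark ((pvCnt xs n m r c : Int)) else v))

-- A's grid update, temp eliminated
def pvStepG (n m : Nat) (g : List (List String)) (p : Nat × Nat) : List (List String) :=
  if pvGetCell g p.1 p.2 = " . " ∧ pvGatherA g n m p.1 p.2 ≠ 0 then
    pvSetCell g p.1 p.2 (pvMark (pvGatherA g n m p.1 p.2))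
  else g

theorem pv_mem_cells {n m : Nat} {p : Nat × Nat} : p ∈ pvCells n m ↔ p.1 < n ∧ p.2 < m := by
  obtain ⟨a, b⟩ := p
  simp [pvCells, List.mem_flatMap]

theorem pv_nodup_cells (n m : Nat) : (pvCells n m).Nodup := by
  unfold pvCells
  rw [List.nodup_flatMap]
  constructor
  · intro r _
    exact (List.nodup_range).map (fun a b h => by simpa using h)
  · refine List.Pairwise.imp ?_ (List.pairwise_lt_range (n := n))
    intro a b hab
    intro x hx hy
    simp only [List.mem_map] at hx hy
    obtain ⟨c1, _, rfl⟩ := hx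
    obtain ⟨c2, _, h⟩ := hy
    cases h
    omega

theorem pv_gatherA_eq (g : List (List String)) (n m r c : Nat) :
    pvGatherA g n m r c = (pvCnt g n m r c : Int) := by
  have h1 : pvGatherA g n m r c = pvOffPairsA.foldl (fun t q =>
      if (0 ≤ (r : Int) + q.1 ∧ (r : Int) + q.1 < (n : Int) ∧ 0 ≤ (c : Int) + q.2 ∧ (c : Int) + q.2 < (m : Int)) ∧
          pvGetCell g ((r : Int) + q.1).toNat ((c : Int) + q.2).toNat = " o " then t + 1 else t) 0 := by
    unfold pvGatherA pvOffPairsA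
    rw [List.foldl_flatMap]
    simp only [List.foldl_map]
    apply PySem.List.foldl_congr_mem
    intro acc x _
    apply PySem.List.foldl_congr_mem
    intro acc2 y _
    by_cases hA : 0 ≤ (r : Int) + x ∧ (r : Int) + x < (n : Int) ∧ 0 ≤ (c : Int) + y ∧ (c : Int) + y < (m : Int)
    · by_cases hB : pvGetCell g ((r : Int) + x).toNat ((c : Int) + y).toNat = " o " <;>
        simp [hA, hB]
    · simp [hA]
  rw [h1, PySem.List.foldl_ite_add_one]
  unfold pvCnt
  rw [Int.zero_add]
  congr 1
  apply List.countP_congr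
  intro q _
  simp only [decide_eq_true_eq]
  tauto

theorem pv_cnt_le (g : List (List String)) (n m r c : Nat) : pvCnt g n m r c ≤ 9 := by
  have h := List.countP_le_length (l := pvOffPairsA) (p := fun q =>
    decide (0 ≤ (r : Int) + q.1 ∧ (r : Int) + q.1 < (n : Int) ∧ 0 ≤ (c : Int) + q.2 ∧ (c : Int) + q.2 < (m : Int) ∧
      pvGetCell g ((r : Int) + q.1).toNat ((c : Int) + q.2).toNat = " o "))
  simpa [pvCnt, pvOffPairsA, pvOffsA] using h

theorem pv_mark_ne_o {k : Nat} (h1 : 1 ≤ k) (h9 : k ≤ 9) : pvMark (k : Int) ≠ " o " := by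
  interval_cases k <;> decide

-- shapes of pvApply
theorem pv_length_apply (xs : List (List String)) (n m : Nat) (D : List (Nat × Nat)) :
    (pvApply xs n m D).length = xs.length := by
  simp [pvApply]

theorem pv_getElem_apply (xs : List (List String)) (n m : Nat) (D : List (Nat × Nat))
    {r : Nat} (hr : r < xs.length) :
    (pvApply xs n m D)[r]'(by simpa [pvApply] using hr) =
      xs[r].mapIdx (fun c v =>
        if (r, c) ∈ D ∧ v = " . " ∧ pvCnt xs n m r c ≠ 0 then pvMark ((pvCnt xs n m r c : Int)) else v) := by
  simp [pvApply]

theorem pv_getCell_in (xs : List (List String)) {r c : Nat} (hr : r < xs.length) (hc : c < xs[r].length) :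
    pvGetCell xs r c = xs[r][c] := by
  simp [pvGetCell, List.getD_eq_getElem?_getD, hr, hc]

theorem pv_getCell_ge (g : List (List String)) {a b : Nat} (hb : (g.getD a []).length ≤ b) :
    pvGetCell g a b = "" := by
  exact List.getD_eq_default _ _ hb

theorem pv_row_apply_length (xs : List (List String)) (n m : Nat) (D : List (Nat × Nat)) (a : Nat) :
    ((pvApply xs n m D).getD a []).length = (xs.getD a []).length := by
  by_cases ha : a < xs.length
  · have ha' : a < (pvApply xs n m D).length := by simpa [pvApply] using ha
    rw [List.getD_eq_getElem?_getD, List.getD_eq_getElem?_getD,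
      List.getElem?_eq_getElem ha', List.getElem?_eq_getElem ha]
    simp [pv_getElem_apply xs n m D ha]
  · rw [List.getD_eq_default _ _ (by rw [pv_length_apply]; omega), List.getD_eq_default _ _ (by omega)]

theorem pv_getCell_apply_in (xs : List (List String)) (n m : Nat) (D : List (Nat × Nat))
    {r c : Nat} (hr : r < xs.length) (hc : c < xs[r].length) :
    pvGetCell (pvApply xs n m D) r c =
      (if (r, c) ∈ D ∧ xs[r][c] = " . " ∧ pvCnt xs n m r c ≠ 0 then pvMark ((pvCnt xs n m r c : Int))
       else xs[r][c]) := by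
  have hr' : r < (pvApply xs n m D).length := by simpa [pvApply] using hr
  have hc' : c < (pvApply xs n m D)[r].length := by
    rw [pv_getElem_apply xs n m D hr]
    simpa using hc
  rw [pv_getCell_in _ hr' hc']
  simp only [pv_getElem_apply xs n m D hr, List.getElem_mapIdx]

theorem pv_isO_apply (xs : List (List String)) (n m : Nat) (D : List (Nat × Nat)) (a b : Nat) :
    (pvGetCell (pvApply xs n m D) a b = " o ") ↔ (pvGetCell xs a b = " o ") := by
  by_cases hab : a < xs.length ∧ b < (xs.getD a []).length
  · obtain ⟨ha, hb⟩ := hab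
    have hgd : xs.getD a [] = xs[a] := by
      rw [List.getD_eq_getElem?_getD, List.getElem?_eq_getElem ha]; rfl
    rw [hgd] at hb
    rw [pv_getCell_apply_in xs n m D ha hb, pv_getCell_in xs ha hb]
    split_ifs with h
    · have h1 : 1 ≤ pvCnt xs n m a b := Nat.one_le_iff_ne_zero.mpr h.2.2
      have h9 := pv_cnt_le xs n m a b
      constructor
      · intro hk; exact absurd hk (pv_mark_ne_o h1 h9)
      · intro hk; rw [h.2.1] at hk; exact absurd hk (by decide)
    · exact Iff.rfl
  · have hb : (xs.getD a []).length ≤ b := by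
      by_cases ha : a < xs.length
      · have := hab; omega
      · rw [List.getD_eq_default _ _ (by omega)]; simp
    rw [pv_getCell_ge xs hb, pv_getCell_ge _ (by rw [pv_row_apply_length]; exact hb)]

theorem pv_cnt_apply (xs : List (List String)) (n m : Nat) (D : List (Nat × Nat)) (n' m' r c : Nat) :
    pvCnt (pvApply xs n m D) n' m' r c = pvCnt xs n' m' r c := by
  unfold pvCnt
  apply List.countP_congr
  intro q hq
  simp only [decide_eq_true_eq]
  have h := pv_isO_apply xs n m D ((r : Int) + q.1).toNat ((c : Int) + q.2).toNat
  tauto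

theorem pv_apply_nil (xs : List (List String)) (n m : Nat) : pvApply xs n m [] = xs := by
  unfold pvApply
  apply List.ext_getElem (by simp)
  intro r h1 h2
  simp only [List.getElem_mapIdx]
  simp only [List.mem_nil_iff, false_and, if_false]
  apply List.ext_getElem (by simp)
  intro c _ _
  simp [List.getElem_mapIdx]

theorem pv_apply_append_not (xs : List (List String)) (n m : Nat) (D : List (Nat × Nat))
    {r c : Nat} (hr : r < xs.length) (hc : c < xs[r].length)
    (hC : ¬ (xs[r][c] = " . " ∧ pvCnt xs n m r c ≠ 0)) :
    pvApply xs n m (D ++ [(r, c)]) = pvApply xs n m D := by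
  unfold pvApply
  apply List.ext_getElem (by simp)
  intro a h1 h2
  simp only [List.getElem_mapIdx]
  apply List.ext_getElem (by simp)
  intro b hb1 hb2
  simp only [List.getElem_mapIdx]
  by_cases hmem : (a, b) ∈ D
  · simp [hmem, List.mem_append]
  · by_cases heq : (a, b) = (r, c)
    · have har : a = r := congrArg Prod.fst heq
      have hbc : b = c := congrArg Prod.snd heq
      subst har; subst hbc
      rw [if_neg (fun h => hC ⟨h.2.1, h.2.2⟩), if_neg (fun h => hC ⟨h.2.1, h.2.2⟩)]
    · simp [hmem, heq, List.mem_append]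

theorem pv_apply_append_set (xs : List (List String)) (n m : Nat) (D : List (Nat × Nat))
    {r c : Nat} (hr : r < xs.length) (hc : c < xs[r].length)
    (hC : xs[r][c] = " . " ∧ pvCnt xs n m r c ≠ 0) :
    pvSetCell (pvApply xs n m D) r c (pvMark ((pvCnt xs n m r c : Int))) =
      pvApply xs n m (D ++ [(r, c)]) := by
  have hrA : r < (pvApply xs n m D).length := by simpa [pvApply] using hr
  unfold pvSetCell
  apply List.ext_getElem (by simp [pvApply])
  intro a h1 h2
  rw [List.getElem_set]
  have h2' : a < xs.length := by simpa [pvApply] using h2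
  have hgetD : (pvApply xs n m D).getD r [] = (pvApply xs n m D)[r] := by
    rw [List.getD_eq_getElem?_getD, List.getElem?_eq_getElem hrA]; rfl
  rw [show (pvApply xs n m (D ++ [(r, c)]))[a] =
      xs[a].mapIdx (fun b v =>
        if (a, b) ∈ D ++ [(r, c)] ∧ v = " . " ∧ pvCnt xs n m a b ≠ 0 then
          pvMark ((pvCnt xs n m a b : Int)) else v) from pv_getElem_apply xs n m _ h2']
  by_cases har : r = a
  · subst har
    rw [if_pos rfl, hgetD, pv_getElem_apply xs n m D hr]
    apply List.ext_getElem (by simp)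
    intro b hb1 hb2
    rw [List.getElem_set]
    simp only [List.getElem_mapIdx]
    by_cases hbc : c = b
    · subst hbc
      rw [if_pos rfl, if_pos ⟨by simp [List.mem_append], hC.1, hC.2⟩]
    · have hne : (r, b) ∈ D ++ [(r, c)] ↔ (r, b) ∈ D := by
        simp [List.mem_append]
        intro h; exact absurd h.symm hbc
      rw [if_neg hbc]
      simp only [hne]
  · rw [if_neg har, pv_getElem_apply xs n m D h2']
    have hne : ∀ b, ((a, b) ∈ D ++ [(r, c)] ↔ (a, b) ∈ D) := by
      intro b
      simp [List.mem_append]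
      intro h; exact absurd h (fun hh => har hh.symm)
    simp only [hne]

theorem pv_foldGA (xs : List (List String)) (m : Nat)
    (hm : ∀ row ∈ xs, m ≤ row.length) :
    ∀ (L D : List (Nat × Nat)), (∀ p ∈ L, p.1 < xs.length ∧ p.2 < m) → (∀ p ∈ L, p ∉ D) → L.Nodup →
      L.foldl (pvStepG xs.length m) (pvApply xs xs.length m D) = pvApply xs xs.length m (D ++ L) := by
  intro L
  induction L with
  | nil => intro D _ _ _; simp
  | cons p L ih =>
    intro D hB hD hN
    obtain ⟨r, c⟩ := p
    have hr : r < xs.length := (hB _ List.mem_cons_self).1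
    have hcm : c < m := (hB _ List.mem_cons_self).2
    have hrow : m ≤ xs[r].length := hm _ (List.getElem_mem hr)
    have hc : c < xs[r].length := lt_of_lt_of_le hcm hrow
    have hnotD : (r, c) ∉ D := hD _ List.mem_cons_self
    simp only [List.foldl_cons]
    have hown : pvGetCell (pvApply xs xs.length m D) r c = xs[r][c] := by
      rw [pv_getCell_apply_in xs _ m D hr hc, if_neg (fun h => hnotD h.1)]
    have hgath : pvGatherA (pvApply xs xs.length m D) xs.length m r c = (pvCnt xs xs.length m r c : Int) := by
      rw [pv_gatherA_eq, pv_cnt_apply]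
    have hstep : pvStepG xs.length m (pvApply xs xs.length m D) (r, c) = pvApply xs xs.length m (D ++ [(r, c)]) := by
      unfold pvStepG
      simp only [hown, hgath]
      by_cases hC : xs[r][c] = " . " ∧ pvCnt xs xs.length m r c ≠ 0
      · rw [if_pos ⟨hC.1, by exact_mod_cast hC.2⟩]
        exact pv_apply_append_set xs _ m D hr hc hC
      · rw [if_neg, pv_apply_append_not xs _ m D hr hc hC]
        intro h
        exact hC ⟨h.1, by exact_mod_cast h.2⟩
    rw [hstep, ih (D ++ [(r, c)])
      (fun q hq => hB q (List.mem_cons_of_mem _ hq))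
      (fun q hq => by
        simp only [List.mem_append, List.mem_singleton]
        rintro (h | h)
        · exact hD q (List.mem_cons_of_mem _ hq) h
        · exact (List.nodup_cons.mp hN).1 (h ▸ hq))
      hN.of_cons]
    rw [List.append_assoc, List.singleton_append]

theorem pv_temp_elim (n m : Nat) :
    ∀ (L : List (Nat × Nat)) (g : List (List String)) (t : Int),
      (L.foldl (fun st p => pvStepA n m st p.1 p.2) (g, t)).1 = L.foldl (pvStepG n m) g := by
  intro L
  induction L with
  | nil => intro g t; rfl
  | cons p L ih =>
    intro g t
    simp only [List.foldl_cons]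
    have hstep : pvStepA n m (g, t) p.1 p.2 =
        (pvStepG n m g p, if pvGetCell g p.1 p.2 = " . " then pvGatherA g n m p.1 p.2 else t) := by
      unfold pvStepA pvStepG
      by_cases hd : pvGetCell g p.1 p.2 = " . " <;> simp [hd, pvMark]
    rw [hstep]
    exact ih _ _

theorem pv_apply_cells_eq_spec (xs : List (List String)) :
    pvApply xs xs.length (xs.headD []).length (pvCells xs.length (xs.headD []).length) = pvSpec xs := by
  unfold pvApply pvSpec
  apply List.ext_getElem (by simp)
  intro r h1 h2
  simp only [List.getElem_mapIdx]
  apply List.ext_getElem (by simp)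
  intro c hc1 hc2
  simp only [List.getElem_mapIdx]
  have h2' : r < xs.length := by simpa using h2
  apply if_congr ?_ rfl rfl
  rw [pv_mem_cells]
  simp only [h2', true_and]

theorem pv_A_eq_spec (xs : List (List String)) (hPre : Pre_genSolution xs) :
    genSolution xs = pvSpec xs := by
  obtain ⟨hne, hm⟩ := hPre
  have hcells : (pvCells xs.length (xs.headD []).length).foldl
        (fun st p => pvStepA xs.length (xs.headD []).length st p.1 p.2) (xs, 0) =
      (List.range xs.length).foldl (fun st rh => (List.range (xs.headD []).length).foldl
        (fun st sp => pvStepA xs.length (xs.headD []).length st rh sp) st) (xs, 0) := by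
    unfold pvCells
    rw [List.foldl_flatMap]
    simp only [List.foldl_map]
  have hfold := pv_foldGA xs (xs.headD []).length hm (pvCells xs.length (xs.headD []).length) []
    (fun p hp => pv_mem_cells.mp hp) (fun p _ => List.not_mem_nil) (pv_nodup_cells _ _)
  rw [pv_apply_nil, List.nil_append, pv_apply_cells_eq_spec] at hfold
  simp only [genSolution]
  rw [← hcells, pv_temp_elim, hfold]

-- ===== B side =====
-- the multiset of all scatter targets, in B's traversal order
def pvT (xs : List (List String)) (n m : Nat) : List (Int × Int) :=
  (pvCells n m).flatMap (fun p =>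
    if pvGetCell xs p.1 p.2 = " o " then
      pvOffPairsB.flatMap (fun q =>
        if 0 ≤ (p.1 : Int) + q.1 ∧ (p.1 : Int) + q.1 < (n : Int) ∧ 0 ≤ (p.2 : Int) + q.2 ∧ (p.2 : Int) + q.2 < (m : Int) ∧
            pvGetCell xs ((p.1 : Int) + q.1).toNat ((p.2 : Int) + q.2).toNat = " . " then
          [((p.1 : Int) + q.1, (p.2 : Int) + q.2)]
        else [])
    else [])

theorem pv_scatter_eq_counter (xs : List (List String)) (n m : Nat) :
    pvScatter xs n m = PySem.Dict.counter (pvT xs n m) := by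
  rw [PySem.Dict.counter_eq_foldl]
  symm
  unfold pvT
  rw [List.foldl_flatMap]
  unfold pvCells
  rw [List.foldl_flatMap]
  simp only [List.foldl_map]
  unfold pvScatter
  apply PySem.List.foldl_congr_mem
  intro d r _
  apply PySem.List.foldl_congr_mem
  intro d2 c _
  by_cases ho : pvGetCell xs r c = " o "
  · simp only [ho, if_pos]
    rw [List.foldl_flatMap]
    unfold pvOffPairsB
    rw [List.foldl_flatMap]
    simp only [List.foldl_map]
    apply PySem.List.foldl_congr_mem
    intro d3 i _
    apply PySem.List.foldl_congr_mem
    intro d4 ii _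
    by_cases hg : 0 ≤ (r : Int) + i ∧ (r : Int) + i < (n : Int) ∧ 0 ≤ (c : Int) + ii ∧ (c : Int) + ii < (m : Int) ∧
        pvGetCell xs ((r : Int) + i).toNat ((c : Int) + ii).toNat = " . "
    · simp [hg]
    · simp [hg]
  · simp [ho]

-- a nodup list with an injective key map hits a key at most once
theorem pv_countP_eq_ite_exists {α β : Type} [DecidableEq β] (l : List α) (hl : l.Nodup)
    (A : α → Prop) [DecidablePred A] (φ : α → β)
    (hinj : ∀ x ∈ l, ∀ y ∈ l, φ x = φ y → x = y) (k : β) :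
    l.countP (fun x => decide (A x ∧ φ x = k)) = if ∃ x ∈ l, A x ∧ φ x = k then 1 else 0 := by
  induction l with
  | nil => simp
  | cons h t ih =>
    have hnd : t.Nodup := hl.of_cons
    have hinj' : ∀ x ∈ t, ∀ y ∈ t, φ x = φ y → x = y := fun x hx y hy =>
      hinj x (List.mem_cons_of_mem _ hx) y (List.mem_cons_of_mem _ hy)
    rw [List.countP_cons]
    by_cases hh : A h ∧ φ h = k
    · have ht0 : t.countP (fun x => decide (A x ∧ φ x = k)) = 0 := by
        rw [List.countP_eq_zero]
        intro x hx
        simp only [decide_eq_true_eq]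
        rintro ⟨_, hxk⟩
        have : x = h := hinj x (List.mem_cons_of_mem _ hx) h (List.mem_cons_self) (hxk.trans hh.2.symm)
        subst this
        exact (List.nodup_cons.mp hl).1 hx
      have hex : ∃ x ∈ h :: t, A x ∧ φ x = k := ⟨h, List.mem_cons_self, hh⟩
      have ht0' : ∀ a ∈ t, A a → ¬ φ a = k := by
        intro a ha hAa hak
        have h0 := List.countP_eq_zero.mp ht0 a ha
        simp [hAa, hak] at h0
      simpa [hh, hex] using ht0'
    · rw [ih hnd hinj']
      have : (∃ x ∈ h :: t, A x ∧ φ x = k) ↔ (∃ x ∈ t, A x ∧ φ x = k) := by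
        constructor
        · rintro ⟨x, hx, hAx⟩
          rcases List.mem_cons.mp hx with rfl | hx'
          · exact absurd hAx hh
          · exact ⟨x, hx', hAx⟩
        · rintro ⟨x, hx, hAx⟩
          exact ⟨x, List.mem_cons_of_mem _ hx, hAx⟩
      simp only [this]
      simp [hh]

theorem pv_count_flatMap_singleton {α β : Type} [BEq β] [LawfulBEq β] [DecidableEq β] (l : List α)
    (g : α → Prop) [DecidablePred g] (v : α → β) (k : β) :
    (l.flatMap (fun x => if g x then [v x] else [])).count k =
      l.countP (fun x => decide (g x ∧ v x = k)) := by
  induction l with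
  | nil => simp
  | cons h t ih =>
    rw [List.flatMap_cons, List.count_append, List.countP_cons, ih]
    by_cases hg : g h
    · by_cases hv : v h = k <;> simp [hg, hv] <;> omega
    · simp [hg]

theorem pv_sum_map_indicator {α : Type} (l : List α) (p : α → Prop) [DecidablePred p] :
    (l.map (fun x => if p x then (1 : Nat) else 0)).sum = l.countP (fun x => decide (p x)) := by
  induction l with
  | nil => simp
  | cons h t ih =>
    by_cases hp : p h <;> simp [hp, ih] <;> omega

theorem pv_mem_offPairsB {q : Int × Int} (h : q ∈ pvOffPairsB) :
    (q.1 = -1 ∨ q.1 = 0 ∨ q.1 = 1) ∧ (q.2 = -1 ∨ q.2 = 0 ∨ q.2 = 1) := by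
  obtain ⟨i, ii⟩ := q
  simp [pvOffPairsB, pvOffsB] at h
  rcases h with ⟨h1, h2⟩ <;> simp_all <;> tauto

theorem pv_mem_offPairsA {q : Int × Int} (h : q ∈ pvOffPairsA) :
    (q.1 = -1 ∨ q.1 = 0 ∨ q.1 = 1) ∧ (q.2 = -1 ∨ q.2 = 0 ∨ q.2 = 1) := by
  obtain ⟨i, ii⟩ := q
  simp [pvOffPairsA, pvOffsA] at h
  rcases h with ⟨h1, h2⟩ <;> simp_all <;> tauto

-- the CRUX: the scatter count seen from a target cell equals the gather count
theorem pv_crux (xs : List (List String)) (n m r c : Nat) (hr : r < n) (hc : c < m) :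
    (pvCells n m).countP (fun p =>
        decide (pvGetCell xs p.1 p.2 = " o " ∧ r ≤ p.1 + 1 ∧ p.1 ≤ r + 1 ∧ c ≤ p.2 + 1 ∧ p.2 ≤ c + 1)) =
      pvCnt xs n m r c := by
  unfold pvCnt
  rw [List.countP_eq_length_filter, List.countP_eq_length_filter]
  have hperm : ((pvCells n m).filter (fun p =>
        decide (pvGetCell xs p.1 p.2 = " o " ∧ r ≤ p.1 + 1 ∧ p.1 ≤ r + 1 ∧ c ≤ p.2 + 1 ∧ p.2 ≤ c + 1))).Perm
      ((pvOffPairsA.filter (fun q =>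
        decide (0 ≤ (r : Int) + q.1 ∧ (r : Int) + q.1 < (n : Int) ∧ 0 ≤ (c : Int) + q.2 ∧ (c : Int) + q.2 < (m : Int) ∧
          pvGetCell xs ((r : Int) + q.1).toNat ((c : Int) + q.2).toNat = " o "))).map
        (fun q => (((r : Int) + q.1).toNat, ((c : Int) + q.2).toNat))) := by
    have hnd1 : ((pvCells n m).filter (fun p =>
        decide (pvGetCell xs p.1 p.2 = " o " ∧ r ≤ p.1 + 1 ∧ p.1 ≤ r + 1 ∧ c ≤ p.2 + 1 ∧ p.2 ≤ c + 1))).Nodup :=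
      (pv_nodup_cells n m).filter _
    have hndA : pvOffPairsA.Nodup := by decide
    have hnd2 : ((pvOffPairsA.filter (fun q =>
        decide (0 ≤ (r : Int) + q.1 ∧ (r : Int) + q.1 < (n : Int) ∧ 0 ≤ (c : Int) + q.2 ∧ (c : Int) + q.2 < (m : Int) ∧
          pvGetCell xs ((r : Int) + q.1).toNat ((c : Int) + q.2).toNat = " o "))).map
        (fun q => (((r : Int) + q.1).toNat, ((c : Int) + q.2).toNat))).Nodup := by
      apply List.Nodup.map_on ?_ (hndA.filter _)
      intro x hx y hy hxy
      have hxQ := (List.mem_filter.mp hx).2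
      have hyQ := (List.mem_filter.mp hy).2
      simp only [decide_eq_true_eq] at hxQ hyQ
      have h1 := congrArg Prod.fst hxy
      have h2 := congrArg Prod.snd hxy
      simp only at h1 h2
      have hx1 : x.1 = y.1 := by omega
      have hx2 : x.2 = y.2 := by omega
      exact Prod.ext hx1 hx2
    rw [List.perm_ext_iff_of_nodup hnd1 hnd2]
    intro p
    obtain ⟨a, b⟩ := p
    simp only [List.mem_filter, List.mem_map, pv_mem_cells, decide_eq_true_eq]
    constructor
    · rintro ⟨⟨ha, hb⟩, hO, hnear⟩
      have et1 : ((r : Int) + ((a : Int) - (r : Int))).toNat = a := by omega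
      have et2 : ((c : Int) + ((b : Int) - (c : Int))).toNat = b := by omega
      refine ⟨((a : Int) - (r : Int), (b : Int) - (c : Int)), ⟨?_, ?_⟩, ?_⟩
      · have e1 : (a : Int) - (r : Int) = -1 ∨ (a : Int) - (r : Int) = 0 ∨ (a : Int) - (r : Int) = 1 := by omega
        have e2 : (b : Int) - (c : Int) = -1 ∨ (b : Int) - (c : Int) = 0 ∨ (b : Int) - (c : Int) = 1 := by omega
        rcases e1 with e1 | e1 | e1 <;> rcases e2 with e2 | e2 | e2 <;>
          simp [pvOffPairsA, pvOffsA, e1, e2]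
      · simp only
        rw [et1, et2]
        refine ⟨by omega, by omega, by omega, by omega, hO⟩
      · simp only
        rw [et1, et2]
    · rintro ⟨q, ⟨hqm, hqQ⟩, heq⟩
      obtain ⟨hb1, hb2, hb3, hb4, hO⟩ := hqQ
      have hrange := pv_mem_offPairsA hqm
      have he1 : ((r : Int) + q.1).toNat = a := congrArg Prod.fst heq
      have he2 : ((c : Int) + q.2).toNat = b := congrArg Prod.snd heq
      rw [he1, he2] at hO
      refine ⟨⟨by omega, by omega⟩, hO, by omega, by omega, by omega, by omega⟩
  rw [List.Perm.length_eq hperm, List.length_map]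

theorem pv_count_T (xs : List (List String)) (n m r c : Nat) :
    (pvT xs n m).count ((r : Int), (c : Int)) =
      if r < n ∧ c < m ∧ pvGetCell xs r c = " . " then pvCnt xs n m r c else 0 := by
  unfold pvT
  rw [List.count_flatMap]
  have hterm : ∀ p ∈ pvCells n m,
      ((List.count ((r : Int), (c : Int))) ∘ (fun p : Nat × Nat =>
        if pvGetCell xs p.1 p.2 = " o " then
          pvOffPairsB.flatMap (fun q =>
            if 0 ≤ (p.1 : Int) + q.1 ∧ (p.1 : Int) + q.1 < (n : Int) ∧ 0 ≤ (p.2 : Int) + q.2 ∧ (p.2 : Int) + q.2 < (m : Int) ∧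
                pvGetCell xs ((p.1 : Int) + q.1).toNat ((p.2 : Int) + q.2).toNat = " . " then
              [((p.1 : Int) + q.1, (p.2 : Int) + q.2)]
            else [])
        else [])) p =
      if (r < n ∧ c < m ∧ pvGetCell xs r c = " . ") ∧
          (pvGetCell xs p.1 p.2 = " o " ∧ r ≤ p.1 + 1 ∧ p.1 ≤ r + 1 ∧ c ≤ p.2 + 1 ∧ p.2 ≤ c + 1) then 1 else 0 := by
    intro p hp
    obtain ⟨a, b⟩ := p
    obtain ⟨ha, hb⟩ := pv_mem_cells.mp hp
    simp only [Function.comp]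
    by_cases ho : pvGetCell xs a b = " o "
    · rw [if_pos ho]
      have hiff : (∃ q ∈ pvOffPairsB,
          (0 ≤ (a : Int) + q.1 ∧ (a : Int) + q.1 < (n : Int) ∧ 0 ≤ (b : Int) + q.2 ∧ (b : Int) + q.2 < (m : Int) ∧
            pvGetCell xs ((a : Int) + q.1).toNat ((b : Int) + q.2).toNat = " . ") ∧
          ((a : Int) + q.1, (b : Int) + q.2) = ((r : Int), (c : Int))) ↔
          ((r < n ∧ c < m ∧ pvGetCell xs r c = " . ") ∧
            (pvGetCell xs a b = " o " ∧ r ≤ a + 1 ∧ a ≤ r + 1 ∧ c ≤ b + 1 ∧ b ≤ c + 1)) := by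
        constructor
        · rintro ⟨q, hqm, ⟨g1, g2, g3, g4, gdot⟩, hkey⟩
          have he1 : (a : Int) + q.1 = (r : Int) := congrArg Prod.fst hkey
          have he2 : (b : Int) + q.2 = (c : Int) := congrArg Prod.snd hkey
          have et1 : ((a : Int) + q.1).toNat = r := by omega
          have et2 : ((b : Int) + q.2).toNat = c := by omega
          rw [et1, et2] at gdot
          have hrange := pv_mem_offPairsB hqm
          exact ⟨⟨by omega, by omega, gdot⟩, ho, by omega, by omega, by omega, by omega⟩
        · rintro ⟨⟨hr', hc', hdot⟩, _, hnear1, hnear2, hnear3, hnear4⟩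
          have et1 : ((a : Int) + ((r : Int) - (a : Int))).toNat = r := by omega
          have et2 : ((b : Int) + ((c : Int) - (b : Int))).toNat = c := by omega
          refine ⟨((r : Int) - (a : Int), (c : Int) - (b : Int)), ?_, ⟨?_, ?_, ?_, ?_, ?_⟩, ?_⟩
          · have e1 : (r : Int) - (a : Int) = -1 ∨ (r : Int) - (a : Int) = 0 ∨ (r : Int) - (a : Int) = 1 := by omega
            have e2 : (c : Int) - (b : Int) = -1 ∨ (c : Int) - (b : Int) = 0 ∨ (c : Int) - (b : Int) = 1 := by omega
            rcases e1 with e1 | e1 | e1 <;> rcases e2 with e2 | e2 | e2 <;>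
              simp [pvOffPairsB, pvOffsB, e1, e2]
          · omega
          · omega
          · omega
          · omega
          · simp only
            rw [et1, et2]
            exact hdot
          · exact Prod.ext (by omega) (by omega)
      refine Eq.trans (pv_count_flatMap_singleton pvOffPairsB _
        (fun q => ((a : Int) + q.1, (b : Int) + q.2)) ((r : Int), (c : Int))) ?_
      refine Eq.trans (pv_countP_eq_ite_exists pvOffPairsB (by decide) _
        (fun q => ((a : Int) + q.1, (b : Int) + q.2))
        (fun x _ y _ hxy => by
          have h1 := congrArg Prod.fst hxy
          have h2 := congrArg Prod.snd hxy
          simp only at h1 h2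
          exact Prod.ext (by omega) (by omega)) ((r : Int), (c : Int))) ?_
      exact if_congr hiff rfl rfl
    · rw [if_neg ho]
      simp [ho]
  rw [List.map_congr_left hterm, pv_sum_map_indicator]
  by_cases hK : r < n ∧ c < m ∧ pvGetCell xs r c = " . "
  · rw [if_pos hK]
    have hre : (pvCells n m).countP (fun p =>
        decide ((r < n ∧ c < m ∧ pvGetCell xs r c = " . ") ∧
          (pvGetCell xs p.1 p.2 = " o " ∧ r ≤ p.1 + 1 ∧ p.1 ≤ r + 1 ∧ c ≤ p.2 + 1 ∧ p.2 ≤ c + 1))) =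
        (pvCells n m).countP (fun p =>
        decide (pvGetCell xs p.1 p.2 = " o " ∧ r ≤ p.1 + 1 ∧ p.1 ≤ r + 1 ∧ c ≤ p.2 + 1 ∧ p.2 ≤ c + 1)) := by
      apply List.countP_congr
      intro p _
      simp only [decide_eq_true_eq]
      tauto
    rw [hre, pv_crux xs n m r c hK.1 hK.2.1]
  · rw [if_neg hK]
    rw [List.countP_eq_zero.mpr]
    intro p _
    simp only [decide_eq_true_eq]
    tauto

theorem pv_B_eq_spec (xs : List (List String)) : genSolution_alt xs = pvSpec xs := by
  simp only [genSolution_alt, pvSpec]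
  apply List.ext_getElem (by simp)
  intro r h1 h2
  simp only [List.getElem_mapIdx]
  apply List.ext_getElem (by simp)
  intro c hc1 hc2
  simp only [List.getElem_mapIdx]
  have h2' : r < xs.length := by simpa using h2
  have hc2' : c < xs[r].length := by simpa using hc2
  have hv : pvGetCell xs r c = xs[r][c] := pv_getCell_in xs h2' hc2'
  have hcount := pv_count_T xs xs.length (xs.headD []).length r c
  have hcontains : (pvScatter xs xs.length (xs.headD []).length).contains ((r : Int), (c : Int)) =
      (pvT xs xs.length (xs.headD []).length).contains ((r : Int), (c : Int)) := by
    rw [pv_scatter_eq_counter]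
    exact PySem.Dict.contains_counter _ _
  have hgd : (pvScatter xs xs.length (xs.headD []).length).getD ((r : Int), (c : Int)) 0 =
      ((pvT xs xs.length (xs.headD []).length).count ((r : Int), (c : Int)) : Int) := by
    rw [pv_scatter_eq_counter]
    exact PySem.Dict.getD_counter _ _
  by_cases hC : c < (xs.headD []).length ∧ xs[r][c] = " . " ∧
      pvCnt xs xs.length (xs.headD []).length r c ≠ 0
  · have hcnt : (pvT xs xs.length (xs.headD []).length).count ((r : Int), (c : Int)) =
        pvCnt xs xs.length (xs.headD []).length r c := by
      rw [hcount, if_pos ⟨h2', hC.1, hv.trans hC.2.1⟩]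
    have hmem : ((r : Int), (c : Int)) ∈ pvT xs xs.length (xs.headD []).length := by
      apply List.count_pos_iff.mp
      rw [hcnt]
      exact Nat.pos_of_ne_zero hC.2.2
    rw [if_pos (by rw [hcontains]; exact List.elem_eq_true_of_mem hmem), if_pos hC]
    rw [hgd, hcnt]
    rfl
  · have hcnt0 : (pvT xs xs.length (xs.headD []).length).count ((r : Int), (c : Int)) = 0 := by
      rw [hcount]
      split_ifs with h
      · by_contra hne
        exact hC ⟨h.2.1, hv ▸ h.2.2, fun h0 => hne (by rw [h0])⟩
      · rfl
    have hnmem : ((r : Int), (c : Int)) ∉ pvT xs xs.length (xs.headD []).length := by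
      intro hm
      have := List.count_pos_iff.mpr hm
      omega
    rw [if_neg (fun hcon => hnmem (by
        rw [hcontains] at hcon
        exact List.mem_of_elem_eq_true hcon)), if_neg hC]

-- ===== VERDICT (by name: the statement is the Claim_ definition above) =====
theorem genSolution_spec : Claim_equal_genSolution := by
  intro xs _hDom hPre
  unfold Spec_genSolution
  rw [pv_A_eq_spec xs hPre, pv_B_eq_spec xs]
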